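-- pv_equiv track=rewrite | github.com/mtx26/TP-algo | algo/TP/TP_12_matis/pb_1.py | chemin
-- ===== SOURCE A (Python) =====
-- def chemin(piece1, piece2, portes, eviter=None):
--     if eviter is None:
--         eviter = []
--     if piece1 == piece2:
--         return [piece1]
--     for porte in portes:
--         p1, p2 = porte
--         if p1 == piece1 and p2 not in eviter:
--                 return [piece1] + chemin(p2, piece2, portes, eviter + [p2])
--     return []
-- ===== SOURCE B (Python) =====
-- def chemin(piece1, piece2, portes, eviter=None):
--     succ = {}
--     for p1, p2 in portes:
--         succ.setdefault(p1, []).append(p2)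
--     avoid = list(eviter) if eviter is not None else []
--     path = []
--     cur = piece1
--     for _ in range(len(portes) + 1):
--         if cur == piece2:
--             return path + [cur]
--         step = None
--         for t in succ.get(cur, []):
--             if t not in avoid:
--                 step = t
--                 break
--         if step is None:
--             return path
--         path.append(cur)
--         avoid.append(step)
--         cur = step
--     return path
-- ===== Notes on version B (the rewrite author's own statement) =====
-- stated objective: alternative
-- what changed: Replaces A's linear recursion that rescans the raw door list at every level with an iterative bounded loop over an adjacency dict built once (room -> ordered target list), a forward path accumulator and a local avoid copy; never mutates the caller's eviter.
import Mathlib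
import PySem

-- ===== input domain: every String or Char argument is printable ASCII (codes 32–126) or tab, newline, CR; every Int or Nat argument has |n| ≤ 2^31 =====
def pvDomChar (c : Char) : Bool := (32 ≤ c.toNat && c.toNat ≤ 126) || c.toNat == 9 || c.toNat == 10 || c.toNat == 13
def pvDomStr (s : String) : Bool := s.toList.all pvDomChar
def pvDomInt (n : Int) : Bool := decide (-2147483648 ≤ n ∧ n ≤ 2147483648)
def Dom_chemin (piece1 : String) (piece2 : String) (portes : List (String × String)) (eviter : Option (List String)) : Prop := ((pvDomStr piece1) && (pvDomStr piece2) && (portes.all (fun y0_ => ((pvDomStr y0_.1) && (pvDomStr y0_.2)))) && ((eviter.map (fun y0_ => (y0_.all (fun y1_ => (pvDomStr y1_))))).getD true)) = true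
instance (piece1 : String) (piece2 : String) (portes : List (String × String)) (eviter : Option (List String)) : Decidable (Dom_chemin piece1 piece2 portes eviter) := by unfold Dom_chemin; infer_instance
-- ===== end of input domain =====

-- B replaces A's recursion (which rescans the whole door list at every level) by an
-- adjacency dict built once plus an iterative fuel-bounded loop with a path accumulator
-- and a local avoid copy (alternative decomposition + data structure; no mutation of eviter).

-- measure used for A's termination: doors whose target is not yet avoided
def cheminMeasure (portes : List (String × String)) (av : List String) : Nat :=
  (portes.filter (fun q => !(av.contains q.2))).length

-- termination helpers (cited by name in decreasing_by of port A)
theorem filter_length_lt {α : Type} (p p' : α → Bool) (hmono : ∀ a, p' a = true → p a = true)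
    (l : List α) (q : α) (hq : q ∈ l) (hp : p q = true) (hp' : p' q = false) :
    (l.filter p').length < (l.filter p).length := by
  induction l with
  | nil => cases hq
  | cons r l ih =>
    rcases List.mem_cons.mp hq with rfl | h
    · have h1 : (l.filter p').length ≤ (l.filter p).length :=
        (List.monotone_filter_right l hmono).length_le
      simp [hp, hp']
      omega
    · have h2 := ih h
      by_cases hr' : p' r = true
      · have hr := hmono r hr'
        simp [hr, hr']
        omega
      · simp only [Bool.not_eq_true] at hr'
        by_cases hr : p r = true
        · simp [hr, hr']
          omega
        · simp only [Bool.not_eq_true] at hr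
          simp [hr, hr']
          omega

theorem cheminMeasure_lt (portes : List (String × String)) (av : List String) (q : String × String)
    (hq : q ∈ portes) (hav : av.contains q.2 = false) :
    cheminMeasure portes (av ++ [q.2]) < cheminMeasure portes av := by
  unfold cheminMeasure
  refine filter_length_lt _ _ ?_ portes q hq ?_ ?_
  · intro a ha
    simp only [Bool.not_eq_true'] at ha ⊢
    simp only [List.contains_append, Bool.or_eq_false_iff] at ha
    exact ha.1
  · simpa using hav
  · simp

-- ===== PORT A =====
-- literal transliteration of A: first matching door via find? (= the for-loop with return),
-- recursion prefixes the current room; dead end returns []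
def cheminA (cur goal : String) (portes : List (String × String)) (av : List String) : List String :=
  if cur == goal then [cur]
  else
    match h : portes.find? (fun q => q.1 == cur && !(av.contains q.2)) with
    | some q => cur :: cheminA q.2 goal portes (av ++ [q.2])
    | none => []
termination_by cheminMeasure portes av
decreasing_by
  have hmem := List.mem_of_find?_eq_some h
  have hpred := List.find?_some h
  simp only [Bool.and_eq_true, Bool.not_eq_true'] at hpred
  exact cheminMeasure_lt portes av q hmem hpred.2

def chemin (piece1 : String) (piece2 : String) (portes : List (String × String)) (eviter : Option (List String)) : List String :=
  cheminA piece1 piece2 portes (eviter.getD [])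

-- ===== PORT B =====
-- succ.setdefault(p1, []).append(p2) over all doors: room -> ordered list of targets
def cheminSucc (portes : List (String × String)) : PySem.Dict String (List String) :=
  portes.foldl (fun d q => d.modify q.1 [] (fun ts => ts ++ [q.2])) PySem.Dict.empty

-- the inner 'for t in succ.get(cur, []): … break' loop
def cheminStep (ts : List String) (av : List String) : Option String :=
  ts.find? (fun t => !(av.contains t))

-- the bounded 'for _ in range(len(portes)+1)' loop, fuel-indexed
def cheminBloop (goal : String) (succ : PySem.Dict String (List String)) :
    Nat → String → List String → List String → List String
  | 0, _, path, _ => path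
  | fuel + 1, cur, path, av =>
    if cur == goal then path ++ [cur]
    else
      match cheminStep (succ.getD cur []) av with
      | some t => cheminBloop goal succ fuel t (path ++ [cur]) (av ++ [t])
      | none => path

def chemin_alt (piece1 : String) (piece2 : String) (portes : List (String × String)) (eviter : Option (List String)) : List String :=
  cheminBloop piece2 (cheminSucc portes) (portes.length + 1) piece1 [] (eviter.getD [])

-- ===== PRECONDITION & SPEC =====
def Spec_chemin (piece1 : String) (piece2 : String) (portes : List (String × String)) (eviter : Option (List String)) (out : List String) : Prop := out = chemin_alt piece1 piece2 portes eviter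
instance (piece1 : String) (piece2 : String) (portes : List (String × String)) (eviter : Option (List String)) (out : List String) : Decidable (Spec_chemin piece1 piece2 portes eviter out) := by unfold Spec_chemin; infer_instance

-- ===== CLAIM =====
def Claim_equal_chemin : Prop := ∀ (piece1 : String) (piece2 : String) (portes : List (String × String)) (eviter : Option (List String)), Dom_chemin piece1 piece2 portes eviter → Spec_chemin piece1 piece2 portes eviter (chemin piece1 piece2 portes eviter)

-- ===== LEMMAS AND PROOFS =====
-- the grouped dict lists exactly the targets of cur's doors, in order
theorem getD_cheminSucc (portes : List (String × String)) (cur : String) :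
    (cheminSucc portes).getD cur [] = (portes.filter (fun q => q.1 == cur)).map (·.2) := by
  unfold cheminSucc
  rw [PySem.Dict.getD_foldl_modify_append]
  simp

-- B's inner scan over the grouped list finds the same target as A's scan over the doors
theorem cheminStep_eq (portes : List (String × String)) (cur : String) (av : List String) :
    cheminStep ((portes.filter (fun q => q.1 == cur)).map (·.2)) av
      = (portes.find? (fun q => q.1 == cur && !(av.contains q.2))).map (·.2) := by
  unfold cheminStep
  induction portes with
  | nil => simp
  | cons q l ih =>
    by_cases hq : (q.1 == cur) = true
    · by_cases hav : (av.contains q.2) = true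
      · simp only [List.contains_eq_mem] at hav
        simp only [List.filter_cons, List.find?_cons, hq, hav]
        simp only [if_true, List.map_cons, List.find?_cons]
        simp [hav]
        simpa using ih
      · simp only [Bool.not_eq_true, List.contains_eq_mem] at hav
        simp [List.filter_cons, List.find?_cons, hq, hav]
    · simp only [Bool.not_eq_true] at hq
      simp [List.filter_cons, List.find?_cons, hq]
      simpa using ih

-- enough fuel: B's loop unrolls to path ++ (A's recursion)
theorem cheminBloop_eq_aux (goal : String) (portes : List (String × String)) :
    ∀ (fuel : Nat) (av : List String), cheminMeasure portes av < fuel →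
      ∀ (cur : String) (path : List String),
        cheminBloop goal (cheminSucc portes) fuel cur path av = path ++ cheminA cur goal portes av := by
  intro fuel
  induction fuel with
  | zero => intro av h; omega
  | succ n ih =>
    intro av hle cur path
    rw [cheminBloop, cheminA]
    by_cases hg : cur = goal
    · simp [hg]
    · have hg' : (cur == goal) = false := by simpa using hg
      simp only [hg', Bool.false_eq_true, if_false]
      rw [getD_cheminSucc, cheminStep_eq]
      cases heq : portes.find? (fun q => q.1 == cur && !(av.contains q.2)) with
      | some q =>
        have hmem := List.mem_of_find?_eq_some heq
        have hpred := List.find?_some heq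
        simp only [Bool.and_eq_true, Bool.not_eq_true'] at hpred
        have hlt := cheminMeasure_lt portes av q hmem hpred.2
        simp only [Option.map_some]
        rw [ih (av ++ [q.2]) (by omega) q.2 (path ++ [cur])]
        simp
      | none => simp

theorem cheminMeasure_le (portes : List (String × String)) (av : List String) :
    cheminMeasure portes av ≤ portes.length :=
  List.length_filter_le _ _

-- ===== VERDICT =====
theorem chemin_spec : Claim_equal_chemin := by
  intro piece1 piece2 portes eviter _
  unfold Spec_chemin chemin chemin_alt
  rw [cheminBloop_eq_aux piece2 portes (portes.length + 1) (eviter.getD [])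
    (by have := cheminMeasure_le portes (eviter.getD []); omega)]
  simp
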